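-- pv_equiv track=rewrite | github.com/yuval1024/ParserCC | utils/helpers_regex.py | convert_regex_no_capture
-- ===== SOURCE A (Python) =====
-- def convert_regex_no_capture(regex_str: str):
--     # replace all "(" with "(?:" - e.g. to match but not to capture
--     assert "(?!" not in regex_str
--
--     str_keeper = "zzzz"
--     while str_keeper in regex_str:
--         str_keeper = str_keeper + str_keeper
--
--     # if we already have "(?:", replace it with some random string to prevent result like "(?:?:"
--     regex_str = regex_str.replace("(?:", str_keeper)
--     regex_str = regex_str.replace("(", "(?:")
--     regex_str = regex_str.replace(str_keeper, "(?:")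
--
--     return regex_str
-- ===== SOURCE B (Python) =====
-- def convert_regex_no_capture(regex_str: str):
--     # replace all "(" with "(?:" - e.g. to match but not to capture
--     assert "(?!" not in regex_str
--     out = []
--     i = 0
--     n = len(regex_str)
--     while i < n:
--         if regex_str[i:i+3] == "(?:":
--             out.append("(?:")
--             i += 3
--         elif regex_str[i] == "(":
--             out.append("(?:")
--             i += 1
--         else:
--             out.append(regex_str[i])
--             i += 1
--     return "".join(out)
-- ===== Notes on version B (the rewrite author's own statement) =====
-- stated objective: simpler
-- what changed: A's placeholder trick (grow a 'zzzz' keeper until it is absent, then three whole-string str.replace passes) is replaced by a single left-to-right scan with a cursor and an output buffer that copies an existing '(?:' as a unit and rewrites a lone '(' to '(?:'.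
-- intended difference: On strings containing 'z(?:', A's all-'z' keeper merges with the neighbouring 'z'-run and the final replace matches it shifted left, so A returns a garbled string (A('z(?:') = '(?:z'), while B converts the groups in place (B('z(?:') = 'z(?:'), which is the intended value. — e.g. on convert_regex_no_capture("z(?:"): A returns "(?:z", B returns "z(?:"
import Mathlib
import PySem

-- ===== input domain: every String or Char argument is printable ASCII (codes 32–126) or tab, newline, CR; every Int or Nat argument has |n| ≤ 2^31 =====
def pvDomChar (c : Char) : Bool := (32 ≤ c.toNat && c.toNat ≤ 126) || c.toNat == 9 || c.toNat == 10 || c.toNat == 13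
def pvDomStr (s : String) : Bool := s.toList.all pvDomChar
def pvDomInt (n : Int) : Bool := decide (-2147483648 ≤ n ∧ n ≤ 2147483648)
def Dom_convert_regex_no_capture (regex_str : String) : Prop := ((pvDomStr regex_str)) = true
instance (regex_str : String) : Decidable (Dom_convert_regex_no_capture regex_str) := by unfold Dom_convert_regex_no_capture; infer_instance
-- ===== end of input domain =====

-- B replaces A's placeholder trick (doubling a 'zzzz' keeper, then three str.replace passes) with a
-- single left-to-right scan over the string; B also returns the intended value on strings where a
-- 'z'-run is immediately followed by "(?:" and A's all-'z' keeper collides with it (see D_ below).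

-- ===== PORT A =====

-- A's while loop: str_keeper = "zzzz"; while str_keeper in regex_str: str_keeper += str_keeper.
-- The nonemptiness hypothesis only justifies termination (doubling strictly grows the keeper).
def keeperLoopA (s : List Char) (k : List Char) (hk : k ≠ []) : List Char :=
  if PySem.Chars.isIn k s then keeperLoopA s (k ++ k) (by simp [hk]) else k
termination_by s.length + 1 - k.length
decreasing_by
  have h1 : k <:+: s := (PySem.Chars.isIn_iff_infix k s).mp (by assumption)
  have h2 : k.length ≤ s.length := h1.length_le
  have h3 : 0 < k.length := List.length_pos_iff.mpr hk
  simp only [List.length_append]; omega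

def convert_regex_no_capture (regex_str : String) : String :=
  -- assert "(?!" not in regex_str  — inputs failing it raise AssertionError; excluded by Pre_ below
  let keeper := keeperLoopA regex_str.toList "zzzz".toList (by decide)
  -- regex_str = regex_str.replace("(?:", str_keeper)
  let r1 := PySem.Chars.replace regex_str.toList "(?:".toList keeper
  -- regex_str = regex_str.replace("(", "(?:")
  let r2 := PySem.Chars.replace r1 "(".toList "(?:".toList
  -- regex_str = regex_str.replace(str_keeper, "(?:")
  String.ofList (PySem.Chars.replace r2 keeper "(?:".toList)

-- ===== PORT B =====

-- B's cursor-and-buffer scan: if regex_str[i:i+3] == "(?:" emit it as a unit and advance by 3,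
-- elif regex_str[i] == "(" emit "(?:", else copy the character.
def scanB : List Char → List Char
  | [] => []
  | c :: rest =>
    if (c :: rest).take 3 = ['(', '?', ':'] then '(' :: '?' :: ':' :: scanB (rest.drop 2)
    else if c = '(' then '(' :: '?' :: ':' :: scanB rest
    else c :: scanB rest
termination_by l => l.length
decreasing_by
  · simp only [List.length_drop, List.length_cons]; omega
  · simp
  · simp

def convert_regex_no_capture_alt (regex_str : String) : String :=
  -- assert "(?!" not in regex_str  — same contract as A; excluded by Pre_ below
  String.ofList (scanB regex_str.toList)

-- ===== PRECONDITION & SPEC =====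

-- Pre_ excludes exactly the inputs containing "(?!", on which A's (and B's) assert raises AssertionError.
def Pre_convert_regex_no_capture (regex_str : String) : Prop :=
  PySem.Str.isIn "(?!" regex_str = false
instance (regex_str : String) : Decidable (Pre_convert_regex_no_capture regex_str) := by
  unfold Pre_convert_regex_no_capture; infer_instance

def pvWitness_convert_regex_no_capture : String := "a(b)|(c)"

-- On strings containing "z(?:", A's all-'z' placeholder merges with the adjacent 'z'-run and the final
-- replace matches it shifted left, so A returns a garbled string (e.g. "(?:z" for "z(?:") while B
-- returns the groups faithfully converted in place ("z(?:"), which is the intended value.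
def D_convert_regex_no_capture (regex_str : String) : Prop :=
  PySem.Str.isIn "z(?:" regex_str = true
instance (regex_str : String) : Decidable (D_convert_regex_no_capture regex_str) := by
  unfold D_convert_regex_no_capture; infer_instance

def Spec_convert_regex_no_capture (regex_str : String) (out : String) : Prop :=
  ¬ D_convert_regex_no_capture regex_str → out = convert_regex_no_capture_alt regex_str
instance (regex_str : String) (out : String) : Decidable (Spec_convert_regex_no_capture regex_str out) := by
  unfold Spec_convert_regex_no_capture; infer_instance

def pvDiffWitness_convert_regex_no_capture : String := "z(?:"
def pvDiffWitnessOut_convert_regex_no_capture : String × String := ("(?:z", "z(?:")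

-- ===== CLAIM (what is proved, stated in full; the proofs are below) =====
def Claim_unchanged_convert_regex_no_capture : Prop := ∀ (regex_str : String), Dom_convert_regex_no_capture regex_str → Pre_convert_regex_no_capture regex_str → Spec_convert_regex_no_capture regex_str (convert_regex_no_capture regex_str)
def Claim_exact_convert_regex_no_capture : Prop := ∀ (regex_str : String), Dom_convert_regex_no_capture regex_str → Pre_convert_regex_no_capture regex_str → D_convert_regex_no_capture regex_str → convert_regex_no_capture regex_str ≠ convert_regex_no_capture_alt regex_str
def Claim_changed_convert_regex_no_capture : Prop := Dom_convert_regex_no_capture (pvDiffWitness_convert_regex_no_capture) ∧ Pre_convert_regex_no_capture (pvDiffWitness_convert_regex_no_capture) ∧ D_convert_regex_no_capture (pvDiffWitness_convert_regex_no_capture) ∧ convert_regex_no_capture (pvDiffWitness_convert_regex_no_capture) = pvDiffWitnessOut_convert_regex_no_capture.1 ∧ convert_regex_no_capture_alt (pvDiffWitness_convert_regex_no_capture) = pvDiffWitnessOut_convert_regex_no_capture.2 ∧ pvDiffWitnessOut_convert_regex_no_capture.1 ≠ pvDiffWitnessOut_convert_regex_no_capture.2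

-- ===== LEMMAS AND PROOFS =====

-- a fuelled mirror of PySem.Chars.replace.go with the accumulator removed
def repF (old new : List Char) : Nat → List Char → List Char
  | 0, l => l
  | _ + 1, [] => []
  | fuel + 1, c :: t =>
    if old.isPrefixOf (c :: t) then new ++ repF old new fuel ((c :: t).drop old.length)
    else c :: repF old new fuel t

lemma go_eq_repF (old new : List Char) :
    ∀ fuel l acc, PySem.Chars.replace.go old new fuel l acc = acc.reverse ++ repF old new fuel l := by
  intro fuel
  induction fuel with
  | zero => intro l acc; simp [PySem.Chars.replace.go, repF]
  | succ fuel ih =>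
    intro l acc
    cases l with
    | nil => simp [PySem.Chars.replace.go, repF]
    | cons c t =>
      rw [PySem.Chars.replace.go]
      by_cases h : old.isPrefixOf (c :: t)
      · simp [h, repF, ih]
      · simp [h, repF, ih]

lemma replace_eq_repF (s old new : List Char) (hold : old ≠ []) :
    PySem.Chars.replace s old new = repF old new s.length s := by
  rw [PySem.Chars.replace]
  simp [List.isEmpty_iff, hold, go_eq_repF]

lemma repF_nil (old new : List Char) : ∀ fuel, repF old new fuel [] = [] := by
  intro fuel; cases fuel <;> rfl

lemma repF_fuel (old new : List Char) (hold : old ≠ []) :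
    ∀ f₁ f₂ l, l.length ≤ f₁ → l.length ≤ f₂ → repF old new f₁ l = repF old new f₂ l := by
  intro f₁
  induction f₁ with
  | zero =>
    intro f₂ l hl _
    have : l = [] := by
      cases l with
      | nil => rfl
      | cons c t => simp at hl
    subst this
    rw [repF_nil, repF_nil]
  | succ f₁ ih =>
    intro f₂ l hl hl₂
    cases l with
    | nil => rw [repF_nil, repF_nil]
    | cons c t =>
      cases f₂ with
      | zero => simp at hl₂
      | succ f₂ =>
        have h1 : 1 ≤ old.length := List.length_pos_iff.mpr hold
        simp only [List.length_cons] at hl hl₂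
        simp only [repF]
        by_cases h : old.isPrefixOf (c :: t)
        · rw [if_pos h, if_pos h,
              ih f₂ _ (by simp only [List.length_drop, List.length_cons]; omega)
                (by simp only [List.length_drop, List.length_cons]; omega)]
        · rw [if_neg h, if_neg h, ih f₂ t (by omega) (by omega)]

lemma replace_nil (old new : List Char) (hold : old ≠ []) :
    PySem.Chars.replace [] old new = [] := by
  rw [replace_eq_repF _ _ _ hold]; rfl

lemma replace_pos (c : Char) (t old new : List Char) (hold : old ≠ [])
    (h : old.isPrefixOf (c :: t)) :
    PySem.Chars.replace (c :: t) old new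
      = new ++ PySem.Chars.replace ((c :: t).drop old.length) old new := by
  have h1 : 1 ≤ old.length := List.length_pos_iff.mpr hold
  rw [replace_eq_repF _ _ _ hold, replace_eq_repF _ _ _ hold]
  simp only [List.length_cons, repF, if_pos h]
  rw [repF_fuel old new hold t.length _ _
        (by simp only [List.length_drop, List.length_cons]; omega) (le_refl _)]

lemma replace_neg (c : Char) (t old new : List Char) (hold : old ≠ [])
    (h : ¬ old.isPrefixOf (c :: t)) :
    PySem.Chars.replace (c :: t) old new = c :: PySem.Chars.replace t old new := by
  rw [replace_eq_repF _ _ _ hold, replace_eq_repF _ _ _ hold]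
  simp only [List.length_cons, repF, if_neg h]

lemma not_isPrefixOf_head (o c : Char) (ot t : List Char) (h : o ≠ c) :
    ¬ (o :: ot).isPrefixOf (c :: t) := by
  intro hp
  obtain ⟨r, hr⟩ := List.isPrefixOf_iff_prefix.mp hp
  exact h (by injection hr)

-- no occurrence of old can start inside u when old's first char does not occur in u
lemma replace_skip (o : Char) (ot u b new : List Char) (ho : o ∉ u) :
    PySem.Chars.replace (u ++ b) (o :: ot) new = u ++ PySem.Chars.replace b (o :: ot) new := by
  induction u with
  | nil => simp
  | cons c u' ih =>
    have hc : o ≠ c := fun h => ho (by simp [h])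
    rw [List.cons_append, replace_neg _ _ _ _ (by simp) (not_isPrefixOf_head o c ot _ hc),
        ih (fun h => ho (by simp [h])), List.cons_append]

lemma not_prefix_replicate (L q : Nat) (hq : q < L) (v : List Char)
    (hv : ∀ c, v.head? = some c → c ≠ 'z') :
    ¬ (List.replicate L 'z').isPrefixOf (List.replicate q 'z' ++ v) := by
  intro h
  obtain ⟨r, hr⟩ := List.isPrefixOf_iff_prefix.mp h
  have hlen : L ≤ q + v.length := by
    have : (List.replicate L 'z' ++ r).length = (List.replicate q 'z' ++ v).length := by rw [hr]
    simp only [List.length_append, List.length_replicate] at this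
    omega
  have hvne : v ≠ [] := by
    intro hve; subst hve; simp at hlen; omega
  have hvz : v[0]? = some 'z' := by
    have e1 : (List.replicate q 'z' ++ v)[q]? = v[0]? := by
      rw [List.getElem?_append_right (by simp)]; simp
    have e2 : (List.replicate L 'z' ++ r)[q]? = some 'z' := by
      rw [List.getElem?_append_left (by simpa using hq)]
      simp [hq]
    rw [← e1, ← hr, e2]
  have hh : v.head? = some 'z' := by rw [List.head?_eq_getElem?]; exact hvz
  exact hv 'z' hh rfl

-- the final replace walks through a 'z'-run shorter than the all-'z' pattern
lemma replace_zrun (L : Nat) (new v : List Char)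
    (hv : ∀ c, v.head? = some c → c ≠ 'z') :
    ∀ q, q < L →
      PySem.Chars.replace (List.replicate q 'z' ++ v) (List.replicate L 'z') new
        = List.replicate q 'z' ++ PySem.Chars.replace v (List.replicate L 'z') new := by
  intro q
  induction q with
  | zero => intro _; simp
  | succ q ih =>
    intro hq
    have hKne : List.replicate L 'z' ≠ ([] : List Char) := by
      simp only [ne_eq, List.replicate_eq_nil_iff]; omega
    have hnp := not_prefix_replicate L (q + 1) hq v hv
    rw [List.replicate_succ, List.cons_append,
        replace_neg _ _ _ _ hKne (by
          simpa only [List.replicate_succ, List.cons_append] using hnp),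
        ih (by omega), List.cons_append]

lemma replace_self_prefix (K y new : List Char) (hK : K ≠ []) :
    PySem.Chars.replace (K ++ y) K new = new ++ PySem.Chars.replace y K new := by
  cases K with
  | nil => exact absurd rfl hK
  | cons a k =>
    rw [List.cons_append,
        replace_pos a _ _ _ hK (List.isPrefixOf_iff_prefix.mpr ⟨y, by simp⟩)]
    congr 1
    have he : a :: (k ++ y) = (a :: k) ++ y := rfl
    rw [he, List.drop_left]

lemma scanB_nil : scanB [] = [] := by rw [scanB]

lemma scanB_pos (t₂ : List Char) :
    scanB ('(' :: '?' :: ':' :: t₂) = '(' :: '?' :: ':' :: scanB t₂ := by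
  rw [scanB]; simp

lemma scanB_neg_paren (t : List Char) (h : ¬ ['(', '?', ':'] <+: ('(' :: t)) :
    scanB ('(' :: t) = '(' :: '?' :: ':' :: scanB t := by
  rw [scanB]
  have hne2 : t.take 2 ≠ ['?', ':'] := by
    intro he
    exact h (by rw [List.prefix_iff_eq_take]; simp [he])
  simp [hne2]

lemma scanB_other (c : Char) (t : List Char) (h : c ≠ '(') :
    scanB (c :: t) = c :: scanB t := by
  rw [scanB]
  simp [h]

lemma scanB_zrun : ∀ (q : Nat) (x : List Char),
    scanB (List.replicate q 'z' ++ x) = List.replicate q 'z' ++ scanB x := by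
  intro q
  induction q with
  | zero => intro x; simp
  | succ q ih =>
    intro x
    rw [List.replicate_succ, List.cons_append, scanB_other 'z' _ (by decide), ih,
        List.cons_append]

lemma keeperLoopA_eval (s k : List Char) (hk : k ≠ [])
    (hf : PySem.Chars.isIn k s = false) : keeperLoopA s k hk = k := by
  rw [keeperLoopA]; simp [hf]

lemma keeperLoopA_spec (s : List Char) : ∀ (k : List Char) (hk : k ≠ []),
    (∃ m, 4 ≤ m ∧ k = List.replicate m 'z') →
    PySem.Chars.isIn (keeperLoopA s k hk) s = false ∧
      ∃ L, 4 ≤ L ∧ keeperLoopA s k hk = List.replicate L 'z' := by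
  intro k hk hrep
  rw [keeperLoopA]
  by_cases h : PySem.Chars.isIn k s = true
  · rw [if_pos h]
    obtain ⟨m, hm, hkm⟩ := hrep
    have h1 : k <:+: s := (PySem.Chars.isIn_iff_infix k s).mp h
    have h2 : k.length ≤ s.length := h1.length_le
    have h3 : 0 < k.length := List.length_pos_iff.mpr hk
    exact keeperLoopA_spec s (k ++ k) (by simp [hk])
      ⟨m + m, by omega, by rw [hkm, List.replicate_add]⟩
  · rw [if_neg h]
    simp only [Bool.not_eq_true] at h
    obtain ⟨m, hm, hkm⟩ := hrep
    exact ⟨h, m, hm, hkm⟩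
termination_by k _ _ => s.length + 1 - k.length
decreasing_by
  simp only [List.length_append]; omega

lemma infix_tail_of_head_ne (X : List Char) (c : Char) (t : List Char)
    (h : X <:+: c :: t) (hne : X.head? ≠ some c) : X <:+: t := by
  rcases List.infix_cons_iff.mp h with hp | hi
  · cases X with
    | nil => exact List.nil_infix
    | cons x xs =>
      obtain ⟨r, hr⟩ := hp
      injection hr with h1 _
      exact absurd (show (x :: xs).head? = some c from by simp [h1]) hne
  · exact hi

lemma zrun_infix_cases : ∀ (q : Nat) (t' : List Char),
    ['z', '(', '?', ':'] <:+: (List.replicate q 'z' ++ t') →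
    ['(', '?', ':'] <+: t' ∨ ['z', '(', '?', ':'] <:+: t' := by
  intro q
  induction q with
  | zero => intro t' h; right; simpa using h
  | succ q ih =>
    intro t' h
    rw [List.replicate_succ, List.cons_append] at h
    rcases List.infix_cons_iff.mp h with hp | hi
    · obtain ⟨r, hr⟩ := hp
      simp only [List.cons_append, List.nil_append] at hr
      injection hr with _ h2
      cases q with
      | zero =>
        left
        simp only [List.replicate_zero, List.nil_append] at h2
        exact ⟨r, by simp [h2]⟩
      | succ q' =>
        exfalso
        rw [List.replicate_succ, List.cons_append] at h2
        injection h2 with h3 _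
        exact absurd h3 (by decide)
    · exact ih t' hi

lemma replicate_append_comm (a b : Nat) (c : Char) (y : List Char) :
    List.replicate a c ++ (List.replicate b c ++ y)
      = List.replicate b c ++ (List.replicate a c ++ y) := by
  rw [← List.append_assoc, ← List.replicate_add, Nat.add_comm, List.replicate_add,
      List.append_assoc]

-- the head of replace(replace(t',"(?:",K),"(","(?:") is not 'z' when t' neither starts
-- with "(?:" nor with 'z'
lemma head_ne_z_r2r1 (L : Nat) (t' : List Char) (hnp : ¬ ['(', '?', ':'] <+: t')
    (hth : ∀ c', t'.head? = some c' → c' ≠ 'z') :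
    ∀ c', (PySem.Chars.replace
        (PySem.Chars.replace t' ['(', '?', ':'] (List.replicate L 'z'))
        ['('] ['(', '?', ':']).head? = some c' → c' ≠ 'z' := by
  cases hd : t' with
  | nil =>
    rw [replace_nil _ _ (by decide), replace_nil _ _ (by decide)]
    intro c' hc'; simp at hc'
  | cons d r =>
    have hdp : ¬ ['(', '?', ':'] <+: (d :: r) := hd ▸ hnp
    by_cases hdc : d = '('
    · subst hdc
      rw [replace_neg _ _ _ _ (by decide) (fun h => hdp (List.isPrefixOf_iff_prefix.mp h)),
          replace_pos _ _ _ _ (by decide) (List.isPrefixOf_iff_prefix.mpr ⟨_, rfl⟩)]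
      simp only [List.cons_append, List.nil_append, List.head?_cons, Option.some.injEq]
      intro c' hc'; subst hc'; decide
    · have hdz : d ≠ 'z' := hth d (by rw [hd]; rfl)
      rw [replace_neg _ _ _ _ (by decide)
            (not_isPrefixOf_head _ _ _ _ (fun h => hdc h.symm)),
          replace_neg _ _ _ _ (by decide)
            (not_isPrefixOf_head _ _ _ _ (fun h => hdc h.symm))]
      intro c' hc'
      simp only [List.head?_cons, Option.some.injEq] at hc'
      subst hc'; exact hdz

lemma pipeline_zrun (L q : Nat) (hqL : q < L) (t' : List Char)
    (hnp : ¬ ['(', '?', ':'] <+: t') (hth : ∀ c', t'.head? = some c' → c' ≠ 'z') :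
    PySem.Chars.replace
        (PySem.Chars.replace
          (PySem.Chars.replace (List.replicate q 'z' ++ t') ['(', '?', ':']
            (List.replicate L 'z'))
          ['('] ['(', '?', ':'])
        (List.replicate L 'z') ['(', '?', ':']
      = List.replicate q 'z' ++ PySem.Chars.replace
        (PySem.Chars.replace (PySem.Chars.replace t' ['(', '?', ':'] (List.replicate L 'z'))
          ['('] ['(', '?', ':'])
        (List.replicate L 'z') ['(', '?', ':'] := by
  rw [replace_skip '(' ['?', ':'] _ _ _ (by simp [List.mem_replicate]),
      replace_skip '(' [] _ _ _ (by simp [List.mem_replicate]),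
      replace_zrun L _ _ (head_ne_z_r2r1 L t' hnp hth) q hqL]

lemma pipeline_eq_scanB (L : Nat) (hL : 4 ≤ L) :
    ∀ (n : Nat) (s : List Char), s.length ≤ n →
      ¬ List.replicate L 'z' <:+: s →
      ¬ ['z', '(', '?', ':'] <:+: s →
      PySem.Chars.replace
          (PySem.Chars.replace (PySem.Chars.replace s ['(', '?', ':'] (List.replicate L 'z'))
            ['('] ['(', '?', ':'])
          (List.replicate L 'z') ['(', '?', ':']
        = scanB s := by
  have hKne : List.replicate L 'z' ≠ ([] : List Char) := by
    simp only [ne_eq, List.replicate_eq_nil_iff]; omega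
  have hKcons : List.replicate L 'z' = 'z' :: List.replicate (L - 1) 'z' := by
    rw [← List.replicate_succ]; congr 1; omega
  have hKnp : ∀ (c : Char), c ≠ 'z' → ∀ (t : List Char),
      ¬ (List.replicate L 'z').isPrefixOf (c :: t) := by
    intro c hc t
    rw [hKcons]
    exact not_isPrefixOf_head _ _ _ _ (fun h => hc h.symm)
  intro n
  induction n with
  | zero =>
    intro s hs _ _
    have : s = [] := by
      cases s with
      | nil => rfl
      | cons c t => simp at hs
    subst this
    rw [replace_nil _ _ (by decide), replace_nil _ _ (by decide), replace_nil _ _ hKne, scanB_nil]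
  | succ n ih =>
    intro s hs hK hz
    cases s with
    | nil =>
      rw [replace_nil _ _ (by decide), replace_nil _ _ (by decide), replace_nil _ _ hKne, scanB_nil]
    | cons c t =>
      have hKt : ¬ List.replicate L 'z' <:+: t := fun h => hK (h.trans (List.suffix_cons c t).isInfix)
      have hzt : ¬ ['z', '(', '?', ':'] <:+: t := fun h => hz (h.trans (List.suffix_cons c t).isInfix)
      by_cases hp : ['(', '?', ':'] <+: (c :: t)
      · -- s starts with "(?:"
        obtain ⟨r, hr⟩ := hp
        simp only [List.cons_append, List.nil_append] at hr
        injection hr.symm with h1 h2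
        subst h1 h2
        have hr1 : ¬ List.replicate L 'z' <:+: r := fun h => hKt (h.trans ⟨['?', ':'], [], by simp⟩)
        have hr2 : ¬ ['z', '(', '?', ':'] <:+: r := fun h => hzt (h.trans ⟨['?', ':'], [], by simp⟩)
        rw [replace_pos _ _ _ _ (by decide)
              (List.isPrefixOf_iff_prefix.mpr ⟨r, by simp⟩)]
        simp only [List.length_cons, List.length_nil, List.drop_succ_cons, List.drop_zero]
        rw [replace_skip '(' [] _ _ _ (by simp [List.mem_replicate]),
            replace_self_prefix _ _ _ hKne, scanB_pos,
            ih r (by simp at hs; omega) hr1 hr2]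
        simp only [List.cons_append, List.nil_append]
      · by_cases hc : c = '('
        · -- s starts with "(" but not "(?:"
          subst hc
          rw [replace_neg _ _ _ _ (by decide) (fun h => hp (List.isPrefixOf_iff_prefix.mp h)),
              replace_pos _ _ _ _ (by decide) (List.isPrefixOf_iff_prefix.mpr ⟨_, rfl⟩)]
          simp only [List.length_cons, List.length_nil, List.drop_succ_cons, List.drop_zero,
            List.cons_append, List.nil_append]
          rw [replace_neg _ _ _ _ hKne (hKnp '(' (by decide) _),
              replace_neg _ _ _ _ hKne (hKnp '?' (by decide) _),
              replace_neg _ _ _ _ hKne (hKnp ':' (by decide) _),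
              scanB_neg_paren t hp, ih t (by simp at hs; omega) hKt hzt]
        · by_cases hzc : c = 'z'
          · -- s starts with a 'z'-run
            subst hzc
            have hsplit : (('z' :: t).takeWhile (· == 'z')) ++ (('z' :: t).dropWhile (· == 'z'))
                = 'z' :: t := List.takeWhile_append_dropWhile
            set u := ('z' :: t).takeWhile (· == 'z') with hu
            set t' := ('z' :: t).dropWhile (· == 'z') with ht'
            have hurep : u = List.replicate u.length 'z' := by
              rw [List.eq_replicate_iff]
              refine ⟨rfl, fun b hb => ?_⟩
              have := List.mem_takeWhile_imp hb
              simpa using this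
            have hune : u ≠ [] := by
              rw [hu, List.takeWhile_cons_of_pos (by simp)]; simp
            have hq1 : 1 ≤ u.length := List.length_pos_iff.mpr hune
            have hqL : u.length < L := by
              by_contra hh
              simp only [not_lt] at hh
              refine hK ?_
              have hpre : List.replicate L 'z' <+: u := by
                rw [hurep]
                exact ⟨List.replicate (u.length - L) 'z', by
                  rw [← List.replicate_add]; congr 1; omega⟩
              exact ((hpre.trans (hsplit ▸ List.prefix_append u t'))).isInfix
            have hth : ∀ c', t'.head? = some c' → c' ≠ 'z' := by
              intro c' hc' he
              subst he
              cases hd : t' with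
              | nil => rw [hd] at hc'; simp at hc'
              | cons d r =>
                rw [hd] at hc'
                have hdz : d = 'z' := by simpa using hc'
                have := List.head?_dropWhile_not (· == 'z') ('z' :: t)
                rw [← ht', hd, hc'] at this
                simp at this
            have hlt' : t'.length ≤ n := by
              have : u.length + t'.length = t.length + 1 := by
                have := congrArg List.length hsplit
                simpa using this
              simp only [List.length_cons] at hs; omega
            have hKt' : ¬ List.replicate L 'z' <:+: t' :=
              fun h => hK (h.trans (hsplit ▸ (List.suffix_append u t').isInfix))
            have hzt' : ¬ ['z', '(', '?', ':'] <:+: t' :=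
              fun h => hz (h.trans (hsplit ▸ (List.suffix_append u t').isInfix))
            have hnp : ¬ ['(', '?', ':'] <+: t' := by
              intro hdp
              obtain ⟨r₂, hr₂⟩ := hdp
              refine hz ⟨List.replicate (u.length - 1) 'z', r₂, ?_⟩
              rw [← hsplit, ← hr₂]
              have h9 : u.length = (u.length - 1) + 1 := by omega
              conv_rhs => rw [hurep, h9, List.replicate_succ']
              simp
            rw [← hsplit, hurep, pipeline_zrun L u.length hqL t' hnp hth, scanB_zrun,
                ih t' hlt' hKt' hzt']
          · -- ordinary character
            rw [replace_neg _ _ _ _ (by decide)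
                  (not_isPrefixOf_head _ _ _ _ (fun h => hc h.symm)),
                replace_neg _ _ _ _ (by decide)
                  (not_isPrefixOf_head _ _ _ _ (fun h => hc h.symm)),
                replace_neg _ _ _ _ hKne (hKnp c hzc _),
                scanB_other c t hc, ih t (by simp at hs; omega) hKt hzt]


-- inside D_ the two pipelines differ: at the first 'z'-run followed by "(?:" A's output
-- continues with '(' where B's continues with 'z'
lemma pipeline_ne_scanB (L : Nat) (hL : 4 ≤ L) :
    ∀ (n : Nat) (s : List Char), s.length ≤ n →
      ¬ List.replicate L 'z' <:+: s →
      ['z', '(', '?', ':'] <:+: s →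
      PySem.Chars.replace
          (PySem.Chars.replace (PySem.Chars.replace s ['(', '?', ':'] (List.replicate L 'z'))
            ['('] ['(', '?', ':'])
          (List.replicate L 'z') ['(', '?', ':']
        ≠ scanB s := by
  have hKne : List.replicate L 'z' ≠ ([] : List Char) := by
    simp only [ne_eq, List.replicate_eq_nil_iff]; omega
  have hKcons : List.replicate L 'z' = 'z' :: List.replicate (L - 1) 'z' := by
    rw [← List.replicate_succ]; congr 1; omega
  have hKnp : ∀ (c : Char), c ≠ 'z' → ∀ (t : List Char),
      ¬ (List.replicate L 'z').isPrefixOf (c :: t) := by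
    intro c hc t
    rw [hKcons]
    exact not_isPrefixOf_head _ _ _ _ (fun h => hc h.symm)
  intro n
  induction n with
  | zero =>
    intro s hs _ hD
    have : s = [] := by
      cases s with
      | nil => rfl
      | cons c t => simp at hs
    subst this
    simp at hD
  | succ n ih =>
    intro s hs hK hD
    cases s with
    | nil => simp at hD
    | cons c t =>
      have hKt : ¬ List.replicate L 'z' <:+: t := fun h => hK (h.trans (List.suffix_cons c t).isInfix)
      by_cases hp : ['(', '?', ':'] <+: (c :: t)
      · obtain ⟨r, hr⟩ := hp
        simp only [List.cons_append, List.nil_append] at hr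
        injection hr.symm with h1 h2
        subst h1 h2
        have hDr : ['z', '(', '?', ':'] <:+: r := by
          have g1 := infix_tail_of_head_ne _ _ _ hD (by decide)
          have g2 := infix_tail_of_head_ne _ _ _ g1 (by decide)
          exact infix_tail_of_head_ne _ _ _ g2 (by decide)
        have hr1 : ¬ List.replicate L 'z' <:+: r := fun h => hKt (h.trans ⟨['?', ':'], [], by simp⟩)
        rw [replace_pos _ _ _ _ (by decide)
              (List.isPrefixOf_iff_prefix.mpr ⟨r, by simp⟩)]
        simp only [List.length_cons, List.length_nil, List.drop_succ_cons, List.drop_zero]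
        rw [replace_skip '(' [] _ _ _ (by simp [List.mem_replicate]),
            replace_self_prefix _ _ _ hKne, scanB_pos]
        intro heq
        simp only [List.cons_append, List.nil_append, List.cons.injEq, true_and] at heq
        exact ih r (by simp at hs; omega) hr1 hDr heq
      · by_cases hc : c = '('
        · subst hc
          have hDt : ['z', '(', '?', ':'] <:+: t := infix_tail_of_head_ne _ _ _ hD (by decide)
          rw [replace_neg _ _ _ _ (by decide) (fun h => hp (List.isPrefixOf_iff_prefix.mp h)),
              replace_pos _ _ _ _ (by decide) (List.isPrefixOf_iff_prefix.mpr ⟨_, rfl⟩)]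
          simp only [List.length_cons, List.length_nil, List.drop_succ_cons, List.drop_zero,
            List.cons_append, List.nil_append]
          rw [replace_neg _ _ _ _ hKne (hKnp '(' (by decide) _),
              replace_neg _ _ _ _ hKne (hKnp '?' (by decide) _),
              replace_neg _ _ _ _ hKne (hKnp ':' (by decide) _),
              scanB_neg_paren t hp]
          intro heq
          simp only [List.cons.injEq, true_and] at heq
          exact ih t (by simp at hs; omega) hKt hDt heq
        · by_cases hzc : c = 'z'
          · subst hzc
            have hsplit : (('z' :: t).takeWhile (· == 'z')) ++ (('z' :: t).dropWhile (· == 'z'))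
                = 'z' :: t := List.takeWhile_append_dropWhile
            set u := ('z' :: t).takeWhile (· == 'z') with hu
            set t' := ('z' :: t).dropWhile (· == 'z') with ht'
            have hurep : u = List.replicate u.length 'z' := by
              rw [List.eq_replicate_iff]
              refine ⟨rfl, fun b hb => ?_⟩
              have := List.mem_takeWhile_imp hb
              simpa using this
            have hune : u ≠ [] := by
              rw [hu, List.takeWhile_cons_of_pos (by simp)]; simp
            have hq1 : 1 ≤ u.length := List.length_pos_iff.mpr hune
            have hqL : u.length < L := by
              by_contra hh
              simp only [not_lt] at hh
              refine hK ?_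
              have hpre : List.replicate L 'z' <+: u := by
                rw [hurep]
                exact ⟨List.replicate (u.length - L) 'z', by
                  rw [← List.replicate_add]; congr 1; omega⟩
              exact ((hpre.trans (hsplit ▸ List.prefix_append u t'))).isInfix
            have hth : ∀ c', t'.head? = some c' → c' ≠ 'z' := by
              intro c' hc' he
              subst he
              cases hd : t' with
              | nil => rw [hd] at hc'; simp at hc'
              | cons d r =>
                rw [hd] at hc'
                have hdz : d = 'z' := by simpa using hc'
                have := List.head?_dropWhile_not (· == 'z') ('z' :: t)
                rw [← ht', hd, hc'] at this
                simp at this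
            have hlt' : t'.length ≤ n := by
              have : u.length + t'.length = t.length + 1 := by
                have := congrArg List.length hsplit
                simpa using this
              simp only [List.length_cons] at hs; omega
            have hKt' : ¬ List.replicate L 'z' <:+: t' :=
              fun h => hK (h.trans (hsplit ▸ (List.suffix_append u t').isInfix))
            by_cases hdp : ['(', '?', ':'] <+: t'
            · -- the collision: A's keeper absorbs the 'z'-run, heads '(' vs 'z' differ
              obtain ⟨t₂, ht₂⟩ := hdp
              rw [← hsplit, ← ht₂, hurep,
                  replace_skip '(' ['?', ':'] _ _ _ (by simp [List.mem_replicate])]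
              simp only [List.cons_append, List.nil_append]
              rw [replace_pos '(' _ _ _ (by decide)
                    (List.isPrefixOf_iff_prefix.mpr ⟨t₂, by simp⟩)]
              simp only [List.length_cons, List.length_nil, List.drop_succ_cons, List.drop_zero]
              rw [replace_skip '(' [] _ _ _ (by simp [List.mem_replicate]),
                  replace_skip '(' [] _ _ _ (by simp [List.mem_replicate]),
                  replicate_append_comm, replace_self_prefix _ _ _ hKne, scanB_zrun]
              intro heq
              have h9 : u.length = (u.length - 1) + 1 := by omega
              rw [h9, List.replicate_succ] at heq
              simp only [List.cons_append] at heq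
              exact absurd (congrArg List.head? heq) (by simp)
            · have hb : ['z', '(', '?', ':'] <:+: t' := by
                have hD' : ['z', '(', '?', ':'] <:+: List.replicate u.length 'z' ++ t' := by
                  rw [← hurep, hsplit]; exact hD
                rcases zrun_infix_cases u.length t' hD' with ha | hb
                · exact absurd ha hdp
                · exact hb
              rw [← hsplit, hurep, pipeline_zrun L u.length hqL t' hdp hth, scanB_zrun]
              intro heq
              exact ih t' hlt' hKt' hb (List.append_cancel_left heq)
          · have hDt : ['z', '(', '?', ':'] <:+: t :=
              infix_tail_of_head_ne _ _ _ hD (by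
                simp only [List.head?_cons, ne_eq, Option.some.injEq]
                exact fun h => hzc h.symm)
            rw [replace_neg _ _ _ _ (by decide)
                  (not_isPrefixOf_head _ _ _ _ (fun h => hc h.symm)),
                replace_neg _ _ _ _ (by decide)
                  (not_isPrefixOf_head _ _ _ _ (fun h => hc h.symm)),
                replace_neg _ _ _ _ hKne (hKnp c hzc _),
                scanB_other c t hc]
            intro heq
            simp only [List.cons.injEq, true_and] at heq
            exact ih t (by simp at hs; omega) hKt hDt heq

-- ===== VERDICT (by name: the statement is the Claim_ definition above) =====
theorem convert_regex_no_capture_spec : Claim_unchanged_convert_regex_no_capture := by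
  intro s _ _ hD
  obtain ⟨hin, L, hL4, hKeq⟩ :=
    keeperLoopA_spec s.toList "zzzz".toList (by decide) ⟨4, by norm_num, by decide⟩
  have hKinf : ¬ List.replicate L 'z' <:+: s.toList := by
    rw [hKeq] at hin
    exact (PySem.Chars.isIn_eq_false_iff _ _).mp hin
  have hzinf : ¬ ['z', '(', '?', ':'] <:+: s.toList := by
    intro h
    exact hD ((PySem.Str.isIn_iff_infix "z(?:" s).mpr (by
      simpa using h))
  unfold convert_regex_no_capture convert_regex_no_capture_alt
  simp only [hKeq]
  congr 1
  have e1 : "(?:".toList = ['(', '?', ':'] := by decide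
  have e2 : "(".toList = ['('] := by decide
  rw [e1, e2]
  exact pipeline_eq_scanB L hL4 s.toList.length s.toList le_rfl hKinf hzinf

theorem convert_regex_no_capture_changed : Claim_changed_convert_regex_no_capture := by
  unfold Claim_changed_convert_regex_no_capture
  refine ⟨by decide, by decide, by decide, ?_, ?_, by decide⟩
  · unfold convert_regex_no_capture
    rw [keeperLoopA_eval _ _ _ (by decide)]
    decide
  · unfold convert_regex_no_capture_alt
    rw [show pvDiffWitness_convert_regex_no_capture.toList = ['z', '(', '?', ':'] from by decide,
        scanB_other 'z' _ (by decide), scanB_pos, scanB_nil]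
    decide

theorem convert_regex_no_capture_tight : Claim_exact_convert_regex_no_capture := by
  intro s _ _ hD
  obtain ⟨hin, L, hL4, hKeq⟩ :=
    keeperLoopA_spec s.toList "zzzz".toList (by decide) ⟨4, by norm_num, by decide⟩
  have hKinf : ¬ List.replicate L 'z' <:+: s.toList := by
    rw [hKeq] at hin
    exact (PySem.Chars.isIn_eq_false_iff _ _).mp hin
  have hzinf : ['z', '(', '?', ':'] <:+: s.toList := by
    have := (PySem.Str.isIn_iff_infix "z(?:" s).mp hD
    simpa using this
  unfold convert_regex_no_capture convert_regex_no_capture_alt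
  simp only [hKeq]
  intro heq
  have hl : PySem.Chars.replace
      (PySem.Chars.replace (PySem.Chars.replace s.toList "(?:".toList (List.replicate L 'z'))
        "(".toList "(?:".toList)
      (List.replicate L 'z') "(?:".toList = scanB s.toList := by
    have := congrArg String.toList heq
    simpa using this
  rw [show ("(?:".toList) = ['(', '?', ':'] from by decide,
      show ("(".toList) = ['('] from by decide] at hl
  exact pipeline_ne_scanB L hL4 s.toList.length s.toList le_rfl hKinf hzinf hl
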